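-- pv_equiv track=rewrite | github.com/vamsikhanna/PPT | Assignment16.py | count_words_after_destruction
-- ===== SOURCE A (Python) =====
-- def count_words_after_destruction(sequence):
--     stack = []
--
--     for word in sequence:
--         if stack and word == stack[-1]:
--             stack.pop()
--         else:
--             stack.append(word)
--
--     return len(stack)
-- ===== SOURCE B (Python) =====
-- def count_words_after_destruction(sequence):
--     words = list(sequence)
--     while True:
--         reduced = []
--         changed = False
--         i = 0
--         while i < len(words):
--             if i + 1 < len(words) and words[i] == words[i + 1]:
--                 i += 2
--                 changed = True
--             else:
--                 reduced.append(words[i])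
--                 i += 1
--         if not changed:
--             return len(reduced)
--         words = reduced
-- ===== Notes on version B (the rewrite author's own statement) =====
-- stated objective: alternative
-- what changed: Replaced the single left-to-right stack pass with brute-force reduction: repeated full scans that delete adjacent equal pairs until a scan makes no removal, then return the length of the irreducible remainder (equal by confluence of pair cancellation).
import Mathlib
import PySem

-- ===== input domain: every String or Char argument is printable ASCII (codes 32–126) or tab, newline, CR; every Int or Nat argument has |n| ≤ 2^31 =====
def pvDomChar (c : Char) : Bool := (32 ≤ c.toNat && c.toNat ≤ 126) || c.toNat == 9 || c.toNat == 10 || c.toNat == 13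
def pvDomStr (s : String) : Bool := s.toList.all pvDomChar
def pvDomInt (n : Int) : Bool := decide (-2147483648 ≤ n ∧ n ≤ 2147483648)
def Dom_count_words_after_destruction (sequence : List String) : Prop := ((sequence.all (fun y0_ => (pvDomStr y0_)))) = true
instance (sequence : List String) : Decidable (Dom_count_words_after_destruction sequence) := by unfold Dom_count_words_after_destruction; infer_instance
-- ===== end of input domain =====

-- B replaces A's single stack pass by repeated whole-list pair-removal scans until a scan removes
-- nothing (same count by confluence of adjacent-equal cancellation); objective: alternative, not faster.

-- ===== PORT A =====
-- Python stack: append/pop at the END of the list; stack[-1] is getLast?.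
def pvAStep (stack : List String) (word : String) : List String :=
  if stack ≠ [] ∧ stack.getLast? = some word then stack.dropLast else stack ++ [word]

def count_words_after_destruction (sequence : List String) : Int :=
  ((sequence.foldl pvAStep []).length : Int)

-- ===== PORT B =====
-- one left-to-right scan of Source B's inner while-loop: drops each adjacent equal pair,
-- returns (reduced list, changed flag)
def pvPass : List String → List String × Bool
  | [] => ([], false)
  | [x] => ([x], false)
  | x :: y :: rest =>
      if x = y then ((pvPass rest).1, true)
      else
        let p := pvPass (y :: rest)
        (x :: p.1, p.2)

theorem pvPass_length_le : ∀ (xs : List String), (pvPass xs).1.length ≤ xs.length := by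
  intro xs
  induction xs using pvPass.induct with
  | case1 => simp [pvPass]
  | case2 x => simp [pvPass]
  | case3 y rest ih => simp [pvPass]; omega
  | case4 x y rest h ih =>
      simp only [pvPass, if_neg h, List.length_cons] at *
      omega

theorem pvPass_changed_lt : ∀ (xs : List String),
    (pvPass xs).2 = true → (pvPass xs).1.length < xs.length := by
  intro xs
  induction xs using pvPass.induct with
  | case1 => simp [pvPass]
  | case2 x => simp [pvPass]
  | case3 y rest ih =>
      intro _
      have := pvPass_length_le rest
      simp [pvPass]; omega
  | case4 x y rest h ih =>
      simp only [pvPass, if_neg h, List.length_cons] at *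
      intro hc
      have := ih hc
      omega

-- Source B's outer while-True loop: repeat the scan until no pair was removed
def pvBLoop (words : List String) : Int :=
  let p := pvPass words
  if p.2 = false then (p.1.length : Int)
  else pvBLoop p.1
termination_by words.length
decreasing_by
  exact pvPass_changed_lt words (by simpa using ‹¬ (pvPass words).2 = false›)

def count_words_after_destruction_alt (sequence : List String) : Int :=
  pvBLoop sequence

-- ===== PRECONDITION & SPEC =====
def Spec_count_words_after_destruction (sequence : List String) (out : Int) : Prop := out = count_words_after_destruction_alt sequence
instance (sequence : List String) (out : Int) : Decidable (Spec_count_words_after_destruction sequence out) := by unfold Spec_count_words_after_destruction; infer_instance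

-- ===== CLAIM (what is proved, stated in full; the proofs are below) =====
def Claim_equal_count_words_after_destruction : Prop := ∀ (sequence : List String), Dom_count_words_after_destruction sequence → Spec_count_words_after_destruction sequence (count_words_after_destruction sequence)

-- ===== LEMMAS AND PROOFS =====

-- proof-side mirror of A's stack with the top at the HEAD of the list
def pvBStep (stack : List String) (word : String) : List String :=
  match stack with
  | [] => [word]
  | top :: rest => if word = top then rest else word :: stack

theorem pvAStep_eq_reverse (st : List String) (w : String) :
    pvAStep st w = (pvBStep st.reverse w).reverse := by
  cases h : st.reverse with
  | nil =>
      have : st = [] := by simpa using congrArg List.reverse h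
      subst this; simp [pvAStep, pvBStep]
  | cons top rest =>
      have hst : st = rest.reverse ++ [top] := by
        have := congrArg List.reverse h
        simpa using this
      subst hst
      by_cases hw : w = top
      · subst hw
        simp [pvAStep, pvBStep]
      · simp [pvAStep, pvBStep, hw, Ne.symm hw]

theorem pvAFold_eq_reverse (xs : List String) : ∀ (st : List String),
    xs.foldl pvAStep st = (xs.foldl pvBStep st.reverse).reverse := by
  induction xs with
  | nil => intro st; simp
  | cons x xs ih =>
      intro st
      have := ih (pvAStep st x)
      simpa [pvAStep_eq_reverse st x] using this

-- the head-stack is always an irreducible chain (no adjacent equal elements)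
theorem pvBStep_chain {st : List String} (h : List.IsChain (· ≠ ·) st) (w : String) :
    List.IsChain (· ≠ ·) (pvBStep st w) := by
  cases st with
  | nil => simp [pvBStep]
  | cons top rest =>
      by_cases hw : w = top
      · simpa [pvBStep, hw] using h.tail
      · simp only [pvBStep, if_neg hw]
        exact List.isChain_cons_cons.mpr ⟨hw, h⟩

-- cancelling an adjacent equal pair leaves an irreducible stack unchanged
theorem pvBStep_cancel {st : List String} (h : List.IsChain (· ≠ ·) st) (w : String) :
    pvBStep (pvBStep st w) w = st := by
  cases st with
  | nil => simp [pvBStep]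
  | cons top rest =>
      by_cases hw : w = top
      · subst hw
        cases rest with
        | nil => simp [pvBStep]
        | cons b t =>
            have hb : w ≠ b := (List.isChain_cons_cons.mp h).1
            simp [pvBStep, hb]
      · simp [pvBStep, hw]

-- one removal pass does not change the stack result (applied from an irreducible stack)
theorem pvPass_fold (xs : List String) : ∀ (st : List String), List.IsChain (· ≠ ·) st →
    (pvPass xs).1.foldl pvBStep st = xs.foldl pvBStep st := by
  induction xs using pvPass.induct with
  | case1 => intro st _; simp [pvPass]
  | case2 x => intro st _; simp [pvPass]
  | case3 y rest ih =>
      intro st hst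
      have hcancel : pvBStep (pvBStep st y) y = st := pvBStep_cancel hst y
      simp only [pvPass, List.foldl_cons, hcancel]
      exact ih st hst
  | case4 x y rest h ih =>
      intro st hst
      simp only [pvPass, if_neg h, List.foldl_cons]
      exact ih (pvBStep st x) (pvBStep_chain hst x)

-- a pass with no removal means the list is already an irreducible chain, and unchanged
theorem pvPass_fix : ∀ (xs : List String), (pvPass xs).2 = false →
    (pvPass xs).1 = xs ∧ List.IsChain (· ≠ ·) xs := by
  intro xs
  induction xs using pvPass.induct with
  | case1 => simp [pvPass]
  | case2 x => simp [pvPass]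
  | case3 y rest ih => simp [pvPass]
  | case4 x y rest h ih =>
      intro hc
      simp only [pvPass, if_neg h] at hc ⊢
      obtain ⟨h1, h2⟩ := ih hc
      refine ⟨by simp [h1], List.isChain_cons_cons.mpr ⟨h, h2⟩⟩

-- folding an irreducible chain onto a stack it cannot pop just reverses it on top
theorem pvFold_chain : ∀ (ys : List String), List.IsChain (· ≠ ·) ys →
    ∀ (st : List String), (∀ a, ys.head? = some a → st.head? ≠ some a) →
    ys.foldl pvBStep st = ys.reverse ++ st := by
  intro ys
  induction ys with
  | nil => intro _ st _; simp
  | cons y r ih =>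
      intro hch st hhd
      have hpush : pvBStep st y = y :: st := by
        cases st with
        | nil => simp [pvBStep]
        | cons s t =>
            have : y ≠ s := fun he => hhd y rfl (by simp [he])
            simp [pvBStep, this]
      rw [List.foldl_cons, hpush]
      have hr := ih ((List.isChain_cons.mp hch).2) (y :: st) (fun a ha => by
        have hya : y ≠ a := by
          cases r with
          | nil => simp at ha
          | cons b t =>
              simp at ha
              subst ha
              exact (List.isChain_cons_cons.mp hch).1
        simpa using fun he => hya he)
      rw [hr]; simp

theorem pvBLoop_eq_fold (xs : List String) :
    pvBLoop xs = ((xs.foldl pvBStep []).length : Int) := by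
  by_cases hfix : (pvPass xs).2 = false
  · obtain ⟨heq, hch⟩ := pvPass_fix xs hfix
    rw [pvBLoop]
    simp only [hfix, if_true]
    rw [pvFold_chain xs hch [] (by simp), heq]
    simp
  · have ih := pvBLoop_eq_fold (pvPass xs).1
    rw [pvBLoop]
    rw [if_neg hfix, ih, pvPass_fold xs [] (by simp)]
termination_by xs.length
decreasing_by exact pvPass_changed_lt xs (by simpa using hfix)

-- ===== VERDICT (by name: the statement is the Claim_ definition above) =====
theorem count_words_after_destruction_spec : Claim_equal_count_words_after_destruction := by
  intro sequence _
  unfold Spec_count_words_after_destruction count_words_after_destruction count_words_after_destruction_alt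
  rw [pvBLoop_eq_fold, pvAFold_eq_reverse sequence []]
  simp
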